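-- pv_equiv track=rewrite | github.com/eolo999/python-qrcode | qrcode.py | _split_alphanumeric_input
-- ===== SOURCE A (Python) =====
-- def _split_alphanumeric_input(input):
--     splitted_data = []
--     tmp_list = []
--     for i in range(1, len(input) + 1):
--         if (i % 2) == 0:
--             tmp_list.append(input[i-1])
--             splitted_data.append(tmp_list)
--             tmp_list = []
--         else:
--             tmp_list.append(input[i-1])
--     if tmp_list:
--         splitted_data.append(tmp_list)
--     return splitted_data
-- ===== SOURCE B (Python) =====
-- def _split_alphanumeric_input(input):
--     # Strided pass: take a slice of two at a time; no parity toggle, no tmp buffer.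
--     result = []
--     i = 0
--     n = len(input)
--     while i < n:
--         result.append(list(input[i:i+2]))
--         i += 2
--     return result
-- ===== Notes on version B (the rewrite author's own statement) =====
-- stated objective: simpler
-- what changed: Replaces the parity-toggle accumulation loop (modulo branch plus a tmp buffer flushed on even indices, with a trailing flush) by a single strided pass that slices two elements at a time.
import Mathlib
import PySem

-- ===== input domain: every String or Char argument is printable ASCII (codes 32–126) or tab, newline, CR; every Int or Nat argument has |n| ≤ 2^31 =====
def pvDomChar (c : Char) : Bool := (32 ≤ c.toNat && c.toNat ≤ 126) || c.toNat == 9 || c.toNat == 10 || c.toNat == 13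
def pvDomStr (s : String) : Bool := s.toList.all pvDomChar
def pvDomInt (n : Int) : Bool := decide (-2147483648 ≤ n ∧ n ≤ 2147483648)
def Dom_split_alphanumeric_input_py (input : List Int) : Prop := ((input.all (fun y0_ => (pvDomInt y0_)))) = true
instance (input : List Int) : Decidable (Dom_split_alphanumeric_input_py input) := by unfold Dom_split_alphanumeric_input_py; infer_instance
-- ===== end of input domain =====

-- B replaces A's parity-toggle loop (tmp buffer flushed on even indices, trailing flush)
-- by a strided while-loop slicing two elements at a time; objective: simpler.


-- ===== PORT A =====
-- one iteration of A's for-loop body (i is the 1-based Python loop index)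
def aStep (input : List Int) (st : List (List Int) × List Int) (i : Int) :
    List (List Int) × List Int :=
  if PySem.Int.mod i 2 == 0 then
    (st.1 ++ [st.2 ++ [PySem.List.pyGetD input (i - 1) 0]], [])
  else
    (st.1, st.2 ++ [PySem.List.pyGetD input (i - 1) 0])

def split_alphanumeric_input_py (input : List Int) : List (List Int) :=
  let st := (PySem.List.pyRange 1 ((input.length : Int) + 1) 1).foldl (aStep input) ([], [])
  if st.2 = [] then st.1 else st.1 ++ [st.2]

-- ===== PORT B =====
-- B's while-loop: append list(input[i:i+2]) and advance i by 2
def altLoop (input : List Int) (n : Int) (i : Int) (result : List (List Int)) :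
    List (List Int) :=
  if _h : i < n then
    altLoop input n (i + 2) (result ++ [PySem.List.slice input (some i) (some (i + 2))])
  else
    result
termination_by (n - i).toNat
decreasing_by omega

def split_alphanumeric_input_py_alt (input : List Int) : List (List Int) :=
  altLoop input (input.length : Int) 0 []

-- ===== PRECONDITION & SPEC =====
def Spec_split_alphanumeric_input_py (input : List Int) (out : List (List Int)) : Prop := out = split_alphanumeric_input_py_alt input
instance (input : List Int) (out : List (List Int)) : Decidable (Spec_split_alphanumeric_input_py input out) := by unfold Spec_split_alphanumeric_input_py; infer_instance

-- ===== CLAIM (what is proved, stated in full; the proofs are below) =====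
def Claim_equal_split_alphanumeric_input_py : Prop := ∀ (input : List Int), Dom_split_alphanumeric_input_py input → Spec_split_alphanumeric_input_py input (split_alphanumeric_input_py input)

-- ===== LEMMAS AND PROOFS =====

-- canonical pairs-of-two chunking, the common reference point of both ports
def chunk2 : List Int → List (List Int)
  | [] => []
  | [a] => [[a]]
  | a :: b :: r => [a, b] :: chunk2 r

theorem mod_succ_even (s : ℕ) (h : s % 2 = 0) : PySem.Int.mod ((s : Int) + 1) 2 = 1 := by
  rw [PySem.Int.mod_eq_emod_of_pos (by omega : (0 : Int) < 2)]
  omega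

theorem mod_succ_succ_even (s : ℕ) (h : s % 2 = 0) : PySem.Int.mod ((s : Int) + 2) 2 = 0 := by
  rw [PySem.Int.mod_eq_emod_of_pos (by omega : (0 : Int) < 2)]
  omega

theorem pyGetD_drop0 {input t : List Int} {s : ℕ} (h : input.drop s = t) :
    PySem.List.pyGetD input (s : Int) 0 = t.getD 0 0 := by
  rw [PySem.List.pyGetD_natCast]
  simp only [List.getD_eq_getElem?_getD]
  rw [show input[s]? = t[0]? from by rw [← h]; simp [List.getElem?_drop]]

theorem pyGetD_drop1 {input t : List Int} {s : ℕ} (h : input.drop s = t) :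
    PySem.List.pyGetD input ((s : Int) + 1) 0 = t.getD 1 0 := by
  rw [show ((s : Int) + 1) = (((s + 1 : ℕ)) : Int) by push_cast; ring, PySem.List.pyGetD_natCast]
  simp only [List.getD_eq_getElem?_getD]
  rw [show input[s + 1]? = t[1]? from by rw [← h]; simp [List.getElem?_drop]]

theorem foldA : ∀ (t input : List Int) (s : ℕ) (acc : List (List Int)),
    input.drop s = t → s % 2 = 0 →
    (let st := (PySem.List.pyRange ((s : Int) + 1) ((s : Int) + t.length + 1) 1).foldl
        (aStep input) (acc, ([] : List Int));
      if st.2 = [] then st.1 else st.1 ++ [st.2]) = acc ++ chunk2 t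
  | [], input, s, acc, h, hs => by
      rw [PySem.List.pyRange_one_eq_nil (by simp)]
      simp [chunk2]
  | [a], input, s, acc, h, hs => by
      have ha : PySem.List.pyGetD input (s : Int) 0 = a := by rw [pyGetD_drop0 h]; rfl
      rw [PySem.List.pyRange_one_cons (by simp)]
      rw [PySem.List.pyRange_one_eq_nil (by simp)]
      simp only [List.foldl_cons, List.foldl_nil, aStep, mod_succ_even s hs]
      have h1 : (s : Int) + 1 - 1 = (s : Int) := by ring
      simp [h1, ha, chunk2]
  | a :: b :: r, input, s, acc, h, hs => by
      have ha : PySem.List.pyGetD input (s : Int) 0 = a := by rw [pyGetD_drop0 h]; rfl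
      have hb : PySem.List.pyGetD input ((s : Int) + 1) 0 = b := by rw [pyGetD_drop1 h]; rfl
      have hr : input.drop (s + 2) = r := by
        have := congrArg (List.drop 2) h
        simpa [List.drop_drop, Nat.add_comm] using this
      simp only [List.length_cons]
      rw [PySem.List.pyRange_one_cons (by omega)]
      rw [PySem.List.pyRange_one_cons (by omega)]
      simp only [List.foldl_cons]
      have e1 : aStep input (acc, []) ((s : Int) + 1) = (acc, [a]) := by
        simp only [aStep, mod_succ_even s hs]
        have h1 : (s : Int) + 1 - 1 = (s : Int) := by ring
        simp [h1, ha]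
      have e2 : aStep input (acc, [a]) ((s : Int) + 1 + 1) = (acc ++ [[a, b]], []) := by
        simp only [aStep]
        rw [show (s : Int) + 1 + 1 = (s : Int) + 2 by ring]
        simp only [mod_succ_succ_even s hs]
        have h2 : (s : Int) + 2 - 1 = (s : Int) + 1 := by ring
        simp [h2, hb]
      rw [e1, e2]
      have ih := foldA r input (s + 2) (acc ++ [[a, b]]) hr (by omega)
      simp only [Nat.cast_add, Nat.cast_ofNat] at ih
      have hrange : PySem.List.pyRange ((s : Int) + 1 + 1 + 1)
            ((s : Int) + ((r.length : Int) + 1 + 1) + 1) 1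
          = PySem.List.pyRange ((s : Int) + 2 + 1) ((s : Int) + 2 + (r.length : Int) + 1) 1 := by
        congr 1; ring
      rw [show ((r.length + 1 + 1 : ℕ) : Int) = ((r.length : Int) + 1 + 1) by push_cast; ring]
      rw [hrange]
      rw [ih]
      simp [chunk2]

theorem altB : ∀ (t input : List Int) (s : ℕ) (result : List (List Int)),
    input.drop s = t →
    altLoop input (input.length : Int) (s : Int) result = result ++ chunk2 t
  | [], input, s, result, h => by
      have hlen : input.length ≤ s := by
        have := congrArg List.length h
        simp [List.length_drop] at this
        omega
      rw [altLoop]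
      simp [chunk2, show ¬ ((s : Int) < (input.length : Int)) by omega]
  | [a], input, s, result, h => by
      have hlen : input.length = s + 1 := by
        have := congrArg List.length h
        simp [List.length_drop] at this
        omega
      have hsl : PySem.List.slice input (some (s : Int)) (some ((s : Int) + 2)) = [a] := by
        rw [show ((s : Int) + 2) = ((s : Int) + ((2 : ℕ) : Int)) by push_cast; ring,
          PySem.List.slice_natCast_add, h]
        rfl
      rw [altLoop]
      simp only [show ((s : Int) < (input.length : Int)) by omega, dif_pos, hsl]
      rw [altLoop]
      simp [chunk2, show ¬ ((s : Int) + 2 < (input.length : Int)) by omega]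
  | a :: b :: r, input, s, result, h => by
      have hlen : s + 2 ≤ input.length := by
        have := congrArg List.length h
        simp [List.length_drop] at this
        omega
      have hsl : PySem.List.slice input (some (s : Int)) (some ((s : Int) + 2)) = [a, b] := by
        rw [show ((s : Int) + 2) = ((s : Int) + ((2 : ℕ) : Int)) by push_cast; ring,
          PySem.List.slice_natCast_add, h]
        rfl
      have hr : input.drop (s + 2) = r := by
        have := congrArg (List.drop 2) h
        simpa [List.drop_drop, Nat.add_comm] using this
      rw [altLoop]
      simp only [show ((s : Int) < (input.length : Int)) by omega, dif_pos, hsl]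
      have ih := altB r input (s + 2) (result ++ [[a, b]]) hr
      rw [show ((s : Int) + 2) = (((s + 2 : ℕ)) : Int) by push_cast; ring, ih]
      simp [chunk2]

-- ===== VERDICT (by name: the statement is the Claim_ definition above) =====
theorem split_alphanumeric_input_py_spec : Claim_equal_split_alphanumeric_input_py := by
  intro input _
  unfold Spec_split_alphanumeric_input_py split_alphanumeric_input_py split_alphanumeric_input_py_alt
  have hA := foldA input input 0 [] (by simp) (by simp)
  have hB := altB input input 0 [] (by simp)
  simp only [Nat.cast_zero, zero_add] at hA hB
  simp only [hB]
  simpa using hA
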